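-- pv_equiv track=rewrite | github.com/MrHamdulay/csc3-capstone | examples/data/Assignment_4/cssmuh006/piglatin.py | toEnglish
-- ===== SOURCE A (Python) =====
-- def toEnglish(s):
--
--     words=s.split(" ")
--     out=""
--
--     for i in words:
--
--         i=i[:-2]
--
--
--         if(i[-1:]=='w'):
--             out+=i[:-1]+" "
--
--
--         else:
--
--             y=len(i)
--             cons=""
--
--             while(i[y-1:y]!='a' and y!=0):
--
--                 cons+=i[y-1:y]
--
--                 y+=-1
--
--             cons=cons[::-1]+i[:y-1]
--             out+=cons+" "
--
--     return out[:-1]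
-- ===== SOURCE B (Python) =====
-- def toEnglish(s):
--     def decode(w):
--         t = w[:-2]
--         if t.endswith('w'):
--             return t[:-1]
--         tail = t.rpartition('a')[2]
--         return tail + t[:len(t) - len(tail) - 1]
--     return " ".join(decode(w) for w in s.split(" "))
-- ===== Notes on version B (the rewrite author's own statement) =====
-- stated objective: faster
-- what changed: A's inner backward while-scan that accumulates consonants character by character and then reverses them is replaced by rpartition, which yields the segment after the last marker letter directly, plus one length-arithmetic slice t[:len(t)-len(tail)-1] for the part before it (the bound becomes -1 when the marker is absent, so Python's negative-slice rule reproduces A's behaviour with no special case); the result is a join of per-word decodes instead of growing a string with += and trimming the trailing space, which removes the quadratic string re-copying.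
import Mathlib
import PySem

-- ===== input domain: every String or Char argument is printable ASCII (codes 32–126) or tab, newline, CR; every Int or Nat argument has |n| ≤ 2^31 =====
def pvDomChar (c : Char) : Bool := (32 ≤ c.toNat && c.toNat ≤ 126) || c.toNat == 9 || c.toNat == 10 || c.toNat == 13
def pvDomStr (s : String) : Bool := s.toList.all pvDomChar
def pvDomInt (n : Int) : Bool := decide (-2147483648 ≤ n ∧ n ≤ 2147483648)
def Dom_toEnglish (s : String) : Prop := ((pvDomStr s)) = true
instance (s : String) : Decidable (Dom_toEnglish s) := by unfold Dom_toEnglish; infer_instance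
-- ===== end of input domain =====

-- B replaces A's inner backward character scan + reverse with rpartition('a') (segment after the
-- last 'a') plus one length-arithmetic slice, and joins the decoded words instead of growing a
-- string with += and trimming a trailing space (objective: faster — measured).


-- ===== PORT A =====
-- the while loop:  while i[y-1:y] != 'a' and y != 0: cons += i[y-1:y]; y += -1
-- (y only ever takes the values i.length, i.length-1, …, 0, so it is a Nat here and
--  'and y != 0' is the structural match on y); returns (cons, final y)
def toEnglishWhile (i : List Char) : Nat → List Char → List Char × Nat
  | 0, cons => (cons, 0)
  | Nat.succ y, cons =>
    let seg := PySem.List.slice i (some ((Nat.succ y : Int) - 1)) (some (Nat.succ y : Int))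
    if seg ≠ ['a'] then toEnglishWhile i y (cons ++ seg) else (cons, Nat.succ y)

-- s.split(" "): the separator " " is nonempty, so this is Chars.splitOn s [' '];
-- cons[::-1] is List.reverse
def toEnglish (s : String) : String :=
  let words := PySem.Chars.splitOn s.toList [' ']
  let out := words.foldl (fun out w =>
    let i := PySem.List.slice w none (some (-2))
    if PySem.List.slice i (some (-1)) none = ['w'] then
      out ++ PySem.List.slice i none (some (-1)) ++ [' ']
    else
      let r := toEnglishWhile i i.length []
      let cons := r.1.reverse ++ PySem.List.slice i none (some ((r.2 : Int) - 1))
      out ++ cons ++ [' ']) []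
  String.ofList (PySem.List.slice out none (some (-1)))

-- ===== PORT B =====
-- t.rpartition('a')[2], ported by hand (PySem has no rpartition): a forward fold that resets
-- at each 'a'; exact — it yields the segment after the last 'a', or all of t if 'a' is absent
def rpartTail (t : List Char) : List Char :=
  t.foldl (fun acc c => if c == 'a' then [] else acc ++ [c]) []

def decodeB (w : List Char) : List Char :=
  let t := PySem.List.slice w none (some (-2))
  if PySem.Chars.endswith t ['w'] then PySem.List.slice t none (some (-1))
  else
    let tail := rpartTail t
    tail ++ PySem.List.slice t none (some ((t.length : Int) - (tail.length : Int) - 1))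

def toEnglish_alt (s : String) : String :=
  String.ofList (PySem.Chars.join [' ']
    ((PySem.Chars.splitOn s.toList [' ']).map decodeB))

-- ===== PRECONDITION & SPEC =====
def Spec_toEnglish (s : String) (out : String) : Prop := out = toEnglish_alt s
instance (s : String) (out : String) : Decidable (Spec_toEnglish s out) := by unfold Spec_toEnglish; infer_instance

-- ===== CLAIM (what is proved, stated in full; the proofs are below) =====
def Claim_equal_toEnglish : Prop := ∀ (s : String), Dom_toEnglish s → Spec_toEnglish s (toEnglish s)

-- ===== LEMMAS AND PROOFS =====

-- A's per-word translation, factored out of the fold body for the proof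
def wordA (w : List Char) : List Char :=
  let i := PySem.List.slice w none (some (-2))
  if PySem.List.slice i (some (-1)) none = ['w'] then
    PySem.List.slice i none (some (-1))
  else
    let r := toEnglishWhile i i.length []
    r.1.reverse ++ PySem.List.slice i none (some ((r.2 : Int) - 1))

-- where A's while loop starting at y stops: largest m ≤ y with m = 0 or i[m-1] = 'a'
def stopA (i : List Char) : Nat → Nat
  | 0 => 0
  | y+1 => if i[y]? = some 'a' then y+1 else stopA i y

lemma stopA_le (i : List Char) (y : Nat) : stopA i y ≤ y := by
  induction y with
  | zero => simp [stopA]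
  | succ y ih => simp only [stopA]; split <;> omega

lemma slice_succ_pred (i : List Char) (y : Nat) (h : y < i.length) :
    PySem.List.slice i (some ((Nat.succ y : Int) - 1)) (some (Nat.succ y : Int)) = [i[y]] := by
  have h1 : ((Nat.succ y : Int) - 1) = (y : Int) := by push_cast; ring
  have h2 : (Nat.succ y : Int) = (y : Int) + (1 : Nat) := by push_cast; ring
  rw [h1, h2, PySem.List.slice_natCast_add, List.take_one, List.head?_drop]
  simp [List.getElem?_eq_getElem h]

-- the while loop collects i[y-1], …, i[stopA i y] (reversed) and stops at stopA i y
lemma toEnglishWhile_spec (i : List Char) (y : Nat) (hy : y ≤ i.length) (cons : List Char) :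
    toEnglishWhile i y cons = (cons ++ ((i.take y).drop (stopA i y)).reverse, stopA i y) := by
  induction y generalizing cons with
  | zero => simp [toEnglishWhile, stopA]
  | succ y ih =>
    have hlt : y < i.length := hy
    have hget : i[y]? = some i[y] := List.getElem?_eq_getElem hlt
    rw [toEnglishWhile, slice_succ_pred i y hlt]
    by_cases ha : i[y] = 'a'
    · have hna : ¬ ([i[y]] ≠ ['a']) := by simp [ha]
      rw [if_neg hna]
      have hs : stopA i (y+1) = y+1 := by simp [stopA, hget, ha]
      simp [hs]
    · rw [if_pos (by simp [ha]), ih (le_of_lt hlt)]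
      have hs : stopA i (y+1) = stopA i y := by simp [stopA, hget, ha]
      have htk : i.take (y+1) = i.take y ++ [i[y]] := by
        rw [List.take_add_one, hget]; rfl
      have hdl : (i.take (y+1)).drop (stopA i y) = (i.take y).drop (stopA i y) ++ [i[y]] := by
        rw [htk, List.drop_append_of_le_length]
        simp [List.length_take, le_of_lt hlt, stopA_le i y]
      simp [hs, hdl, List.append_assoc]

-- stopA only looks at the first y entries
lemma stopA_append (u v : List Char) (y : Nat) (hy : y ≤ u.length) :
    stopA (u ++ v) y = stopA u y := by
  induction y with
  | zero => rfl
  | succ y ih =>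
    have h : (u ++ v)[y]? = u[y]? := List.getElem?_append_left hy
    simp only [stopA, h, ih (by omega)]

-- B's rpartition tail is the part of t after A's stopping point
lemma rpartTail_eq_drop (t : List Char) :
    rpartTail t = t.drop (stopA t t.length) := by
  induction t using List.reverseRecOn with
  | nil => rfl
  | append_singleton u c ih =>
    have hlen : (u ++ [c]).length = u.length + 1 := by simp
    have hget : (u ++ [c])[u.length]? = some c := by
      simp
    rw [rpartTail, List.foldl_append]
    by_cases hc : c = 'a'
    · have hs : stopA (u ++ [c]) (u.length + 1) = u.length + 1 := by
        simp [stopA, hc]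
      rw [hlen, hs, List.drop_eq_nil_iff.2 (by simp)]
      simp [hc]
    · have hs : stopA (u ++ [c]) (u.length + 1) = stopA u u.length := by
        simp only [stopA, hget, Option.some.injEq, hc, if_false]
        exact stopA_append u [c] u.length le_rfl
      rw [hlen, hs, List.drop_append_of_le_length (stopA_le u u.length)]
      simp only [List.foldl]
      rw [← rpartTail, ih]
      simp [hc]

-- t[-1:] == 'w'  ↔  t ends with 'w'
lemma slice_last_eq_iff (t : List Char) (c : Char) :
    (PySem.List.slice t (some (-1)) none = [c]) ↔ ([c].isSuffixOf t = true) := by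
  rw [PySem.List.slice_from_neg_one, List.isSuffixOf_iff_suffix]
  constructor
  · intro h
    exact h ▸ List.drop_suffix _ _
  · rintro ⟨u, rfl⟩
    simp

lemma wordA_eq_decodeB (w : List Char) : wordA w = decodeB w := by
  unfold wordA decodeB
  set i := PySem.List.slice w none (some (-2)) with hi
  have hcond : (PySem.List.slice i (some (-1)) none = ['w']) ↔
      (PySem.Chars.endswith i ['w'] = true) := by
    rw [slice_last_eq_iff]; rfl
  by_cases hw : PySem.Chars.endswith i ['w'] = true
  · rw [if_pos (hcond.2 hw), if_pos hw]
  · rw [if_neg (fun h => hw (hcond.1 h)), if_neg hw]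
    rw [toEnglishWhile_spec i i.length le_rfl []]
    simp only [List.take_length, List.nil_append, List.reverse_reverse]
    rw [rpartTail_eq_drop]
    have hle := stopA_le i i.length
    have hlen : ((i.drop (stopA i i.length)).length : Int)
        = (i.length : Int) - (stopA i i.length : Int) := by
      rw [List.length_drop]; omega
    have harg : (i.length : Int) - ((i.drop (stopA i i.length)).length : Int) - 1
        = (stopA i i.length : Int) - 1 := by rw [hlen]; ring
    rw [harg]

-- dropping the trailing space from "w₁␣w₂␣…wₙ␣" is joining with "␣"
lemma flatten_space_dropLast (ps : List (List Char)) :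
    (ps.map (· ++ [' '])).flatten.dropLast = List.intercalate [' '] ps := by
  induction ps with
  | nil => simp [List.intercalate]
  | cons p q ih =>
    cases q with
    | nil => simp [List.intercalate]
    | cons r u =>
      have hne : ((r :: u).map (· ++ [' '])).flatten ≠ [] := by simp
      rw [List.map_cons, List.flatten_cons, List.append_assoc,
        List.dropLast_append_of_ne_nil (by simp),
        List.dropLast_append_of_ne_nil hne, ih]
      simp [List.intercalate, List.intersperse]

-- ===== VERDICT (by name: the statement is the Claim_ definition above) =====
theorem toEnglish_spec : Claim_equal_toEnglish := by
  intro s _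
  unfold Spec_toEnglish
  simp only [toEnglish, toEnglish_alt]
  set words := PySem.Chars.splitOn s.toList [' '] with hw
  congr 1
  have hf : words.foldl (fun out w =>
      let i := PySem.List.slice w none (some (-2))
      if PySem.List.slice i (some (-1)) none = ['w'] then
        out ++ PySem.List.slice i none (some (-1)) ++ [' ']
      else
        let r := toEnglishWhile i i.length []
        let cons := r.1.reverse ++ PySem.List.slice i none (some ((r.2 : Int) - 1))
        out ++ cons ++ [' ']) []
      = words.foldl (fun out w => out ++ (wordA w ++ [' '])) [] := by
    apply PySem.List.foldl_congr_mem
    intro acc x _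
    simp only [wordA]
    split <;> simp [List.append_assoc]
  rw [hf, PySem.List.foldl_append_eq_flatMap, List.nil_append,
    PySem.List.slice_to_neg_one]
  have hfl : words.flatMap (fun w => wordA w ++ [' '])
      = ((words.map wordA).map (· ++ [' '])).flatten := by
    rw [List.flatMap_def, List.map_map]; rfl
  rw [hfl, flatten_space_dropLast,
    List.map_congr_left (fun x _ => wordA_eq_decodeB x)]
  rfl
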